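-- pv_equiv track=rewrite | github.com/Aurivelle/Advanced-Data-Structure | Experiments of BST Upper Bounds and Lower Bounds/Code/generator.py | generate_zigzag
-- ===== SOURCE A (Python) =====
-- def generate_zigzag(n):
--     left = 1
--     right = n
--     seq = []
--     while left <= right:
--         seq.append(left)
--         left += 1
--         if left <= right:
--             seq.append(right)
--             right -= 1
--     return seq
-- ===== SOURCE B (Python) =====
-- def generate_zigzag(n):
--     return [i // 2 + 1 if i % 2 == 0 else n - i // 2 for i in range(n)]
-- ===== Notes on version B (the rewrite author's own statement) =====
-- stated objective: simpler
-- what changed: Replaces the two-pointer while loop with stateful appends by a single list comprehension computing each position from a closed-form index formula.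
import Mathlib
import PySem

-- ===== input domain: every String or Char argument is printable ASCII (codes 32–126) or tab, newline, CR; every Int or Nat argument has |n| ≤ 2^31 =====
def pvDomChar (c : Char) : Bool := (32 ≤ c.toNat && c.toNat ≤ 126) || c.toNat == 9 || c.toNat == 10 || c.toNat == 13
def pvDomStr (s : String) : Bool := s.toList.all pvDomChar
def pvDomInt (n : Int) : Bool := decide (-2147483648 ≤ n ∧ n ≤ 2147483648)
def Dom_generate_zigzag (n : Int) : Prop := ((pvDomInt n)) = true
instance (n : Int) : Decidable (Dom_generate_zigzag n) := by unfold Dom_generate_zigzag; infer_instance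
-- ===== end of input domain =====

-- B replaces A's two-pointer while loop by a list comprehension with a closed-form per-index formula (objective: simpler).

-- ===== PORT A =====
-- the while loop: state (left, right, seq); one iteration appends left, then possibly right
def zigzagLoop (left right : Int) (seq : List Int) : List Int :=
  if _h : left ≤ right then
    if _h2 : left + 1 ≤ right then
      zigzagLoop (left + 1) (right - 1) (seq ++ [left] ++ [right])
    else seq ++ [left]
  else seq
termination_by (right + 1 - left).toNat
decreasing_by omega

def generate_zigzag (n : Int) : List Int :=
  zigzagLoop 1 n []

-- ===== PORT B =====
def generate_zigzag_alt (n : Int) : List Int :=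
  (PySem.List.pyRange 0 n 1).map (fun i =>
    if PySem.Int.mod i 2 = 0 then PySem.Int.floordiv i 2 + 1 else n - PySem.Int.floordiv i 2)

-- ===== PRECONDITION & SPEC =====
def Spec_generate_zigzag (n : Int) (out : List Int) : Prop := out = generate_zigzag_alt n
instance (n : Int) (out : List Int) : Decidable (Spec_generate_zigzag n out) := by unfold Spec_generate_zigzag; infer_instance

-- ===== CLAIM (what is proved, stated in full; the proofs are below) =====
def Claim_equal_generate_zigzag : Prop := ∀ (n : Int), Dom_generate_zigzag n → Spec_generate_zigzag n (generate_zigzag n)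

-- ===== LEMMAS AND PROOFS =====

-- closed form of A's loop: (range k).map f with k = remaining width, f read off l and r
theorem zigzagLoop_closed (k : Nat) : ∀ (l r : Int) (s : List Int), (r + 1 - l).toNat = k →
    zigzagLoop l r s = s ++ (List.range k).map
      (fun i : Nat => if i % 2 = 0 then l + ((i / 2 : Nat) : Int) else r - ((i / 2 : Nat) : Int)) := by
  induction k using Nat.strong_induction_on with
  | _ k ih =>
    intro l r s hk
    match k, hk with
    | 0, hk =>
      rw [zigzagLoop]
      have : ¬ l ≤ r := by omega
      simp [this]
    | 1, hk =>
      rw [zigzagLoop]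
      have h1 : l ≤ r := by omega
      have h2 : ¬ l + 1 ≤ r := by omega
      simp [h1, h2, List.range_succ]
    | (k' + 2), hk =>
      rw [zigzagLoop]
      have h1 : l ≤ r := by omega
      have h2 : l + 1 ≤ r := by omega
      simp only [h1, h2, dif_pos]
      rw [ih k' (by omega) (l + 1) (r - 1) _ (by omega)]
      have key : (List.range (k' + 2)).map
          (fun i : Nat => if i % 2 = 0 then l + ((i / 2 : Nat) : Int) else r - ((i / 2 : Nat) : Int))
          = [l, r] ++ (List.range k').map
          (fun i : Nat => if i % 2 = 0 then (l + 1) + ((i / 2 : Nat) : Int) else (r - 1) - ((i / 2 : Nat) : Int)) := by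
        rw [show k' + 2 = 2 + k' by omega, List.range_add, List.map_append, List.map_map]
        congr 1
        · norm_num [List.range_succ]
        · apply List.map_congr_left
          intro i _
          simp only [Function.comp_apply]
          have hmod : (2 + i) % 2 = i % 2 := by omega
          have hdiv : (2 + i) / 2 = i / 2 + 1 := by omega
          rw [hmod, hdiv]
          by_cases hi : i % 2 = 0 <;> simp [hi] <;> ring
      rw [key]
      simp [List.append_assoc]

-- pointwise agreement of B's formula with the loop's closed form (at l = 1, r = n)
theorem formula_agree (n : Int) (i : Nat) :
    (if PySem.Int.mod ((0 : Int) + (i : Int)) 2 = 0 then PySem.Int.floordiv ((0 : Int) + (i : Int)) 2 + 1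
     else n - PySem.Int.floordiv ((0 : Int) + (i : Int)) 2)
    = (if i % 2 = 0 then (1 : Int) + ((i / 2 : Nat) : Int) else n - ((i / 2 : Nat) : Int)) := by
  have hm : PySem.Int.mod ((0 : Int) + (i : Int)) 2 = ((i % 2 : Nat) : Int) := by
    simp [PySem.Int.mod, Int.fmod_eq_emod]
  have hd : PySem.Int.floordiv ((0 : Int) + (i : Int)) 2 = ((i / 2 : Nat) : Int) := by
    simp [PySem.Int.floordiv, Int.fdiv_eq_ediv]
  rw [hm, hd]
  simp only [Int.natCast_eq_zero]
  by_cases hi : i % 2 = 0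
  · simp [hi, add_comm]
  · simp [hi]

-- ===== VERDICT (by name: the statement is the Claim_ definition above) =====
theorem generate_zigzag_spec : Claim_equal_generate_zigzag := by
  intro n _
  unfold Spec_generate_zigzag generate_zigzag generate_zigzag_alt
  rw [zigzagLoop_closed n.toNat 1 n [] (by omega), PySem.List.pyRange_one, List.map_map]
  simp only [Int.sub_zero, List.nil_append]
  apply List.map_congr_left
  intro i _
  exact (formula_agree n i).symm
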